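-- pv_equiv track=rewrite | github.com/obowart/dart-score-app | app.py | get_sector
-- ===== SOURCE A (Python) =====
-- SECTOR_ANGLES = [
--     (351, 9, 6), (9, 27, 13), (27, 45, 4), (45, 63, 18), (63, 81, 1),
--     (81, 99, 20), (99, 117, 5), (117, 135, 12), (135, 153, 9),
--     (153, 171, 14), (171, 189, 11), (189, 207, 8), (207, 225, 16),
--     (225, 243, 7), (243, 261, 19), (261, 279, 3), (279, 297, 17),
--     (297, 315, 2), (315, 333, 15), (333, 351, 10)
-- ]
--
-- def get_sector(angle):
--     for start, end, score in SECTOR_ANGLES: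
--         if start > end:
--             if angle >= start or angle < end:
--                 return score
--         else:
--             if start <= angle < end:
--                 return score
--     return 0
-- ===== SOURCE B (Python) =====
-- SCORES = [6, 13, 4, 18, 1, 20, 5, 12, 9, 14, 11, 8, 16, 7, 19, 3, 17, 2, 15, 10]
--
-- def get_sector(angle):
--     if 9 <= angle < 351:
--         return SCORES[(angle - 9) // 18 + 1]
--     return 6
-- ===== Notes on version B (the rewrite author's own statement) =====
-- stated objective: simpler
-- what changed: Replaces the linear scan over the 20 (start,end,score) tuples with a closed-form arithmetic index into a flat score list; everything outside [9,351) falls to 6, which is exactly where A's wrap-around first tuple catches every such integer.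
import Mathlib
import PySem

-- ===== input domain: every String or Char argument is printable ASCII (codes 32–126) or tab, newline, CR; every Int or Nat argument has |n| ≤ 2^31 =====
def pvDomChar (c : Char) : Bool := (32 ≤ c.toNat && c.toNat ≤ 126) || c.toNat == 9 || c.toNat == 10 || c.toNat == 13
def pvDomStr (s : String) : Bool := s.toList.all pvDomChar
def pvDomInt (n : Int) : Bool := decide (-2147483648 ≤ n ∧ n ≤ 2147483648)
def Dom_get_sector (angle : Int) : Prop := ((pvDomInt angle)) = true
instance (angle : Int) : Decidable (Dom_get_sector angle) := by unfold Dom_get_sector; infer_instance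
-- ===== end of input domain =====

-- B replaces A's linear scan over angle ranges by a closed-form index into a flat score table (objective: simpler).

-- ===== PORT A =====
def SECTOR_ANGLES : List (Int × Int × Int) :=
  [(351, 9, 6), (9, 27, 13), (27, 45, 4), (45, 63, 18), (63, 81, 1),
   (81, 99, 20), (99, 117, 5), (117, 135, 12), (135, 153, 9),
   (153, 171, 14), (171, 189, 11), (189, 207, 8), (207, 225, 16),
   (225, 243, 7), (243, 261, 19), (261, 279, 3), (279, 297, 17),
   (297, 315, 2), (315, 333, 15), (333, 351, 10)]

-- the for-loop with early return, as structural recursion on the tuple list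
def sectorLoop (rows : List (Int × Int × Int)) (angle : Int) : Int :=
  match rows with
  | [] => 0
  | (start, end_, score) :: rest =>
    if start > end_ then
      if angle ≥ start ∨ angle < end_ then score else sectorLoop rest angle
    else
      if start ≤ angle ∧ angle < end_ then score else sectorLoop rest angle

def get_sector (angle : Int) : Int := sectorLoop SECTOR_ANGLES angle

-- ===== PORT B =====
def SCORES : List Int := [6, 13, 4, 18, 1, 20, 5, 12, 9, 14, 11, 8, 16, 7, 19, 3, 17, 2, 15, 10]

-- SCORES[(angle-9)//18 + 1]: the index is always in range when 9 ≤ angle < 351, so getD 0 never fires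
def get_sector_alt (angle : Int) : Int :=
  if 9 ≤ angle ∧ angle < 351 then
    (PySem.List.pyGet? SCORES (PySem.Int.floordiv (angle - 9) 18 + 1)).getD 0
  else 6

-- ===== PRECONDITION & SPEC =====
def Spec_get_sector (angle : Int) (out : Int) : Prop := out = get_sector_alt angle
instance (angle : Int) (out : Int) : Decidable (Spec_get_sector angle out) := by unfold Spec_get_sector; infer_instance

-- ===== CLAIM (what is proved, stated in full; the proofs are below) =====
def Claim_equal_get_sector : Prop := ∀ (angle : Int), Dom_get_sector angle → Spec_get_sector angle (get_sector angle)

-- ===== LEMMAS AND PROOFS =====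

set_option maxHeartbeats 4000000 in
theorem get_sector_eq_alt (angle : Int) : get_sector angle = get_sector_alt angle := by
  by_cases h : 9 ≤ angle ∧ angle < 351
  · obtain ⟨h1, h2⟩ := h
    interval_cases angle <;> decide
  · have h6 : angle ≥ 351 ∨ angle < 9 := by omega
    simp only [get_sector, SECTOR_ANGLES]
    rw [sectorLoop, if_pos (by norm_num : (351:Int) > 9), if_pos h6]
    simp [get_sector_alt, h]

-- ===== VERDICT (by name: the statement is the Claim_ definition above) =====
theorem get_sector_spec : Claim_equal_get_sector := by
  intro angle _
  unfold Spec_get_sector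
  exact get_sector_eq_alt angle
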